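-- pv_equiv track=rewrite | github.com/sangheonEN/Thomas_Control_Automatic_Speech_Recognition_Button | RealTimeSTT_LEE/audio_recorder.py | _find_tail_match_in_text
-- ===== SOURCE A (Python) =====
-- def _find_tail_match_in_text(text1, text2, length_of_match=10):
--     """
--     Find the position where the last 'n' characters of text1
--     match with a substring in text2.
--
--     This method takes two texts, extracts the last 'n' characters from
--     text1 (where 'n' is determined by the variable 'length_of_match'), and
--     searches for an occurrence of this substring in text2, starting from
--     the end of text2 and moving towards the beginning.
--
--     Parameters:
--     - text1 (str): The text containing the substring that we want to find
--       in text2.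
--     - text2 (str): The text in which we want to find the matching
--       substring.
--     - length_of_match(int): The length of the matching string that we are
--       looking for
--
--     Returns:
--     int: The position (0-based index) in text2 where the matching
--       substring starts. If no match is found or either of the texts is
--       too short, returns -1.
--     """
--
--     # Check if either of the texts is too short
--     if len(text1) < length_of_match or len(text2) < length_of_match:
--         return -1
--
--     # The end portion of the first text that we want to compare
--     target_substring = text1[-length_of_match:]
--
--     # Loop through text2 from right to left
--     for i in range(len(text2) - length_of_match + 1):
--         # Extract the substring from text2
--         # to compare with the target_substring
--         current_substring = text2[len(text2) - i - length_of_match: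
--                                   len(text2) - i]
--
--         # Compare the current_substring with the target_substring
--         if current_substring == target_substring:
--             # Position in text2 where the match starts
--             return len(text2) - i
--
--     return -1
-- ===== SOURCE B (Python) =====
-- def _find_tail_match_in_text(text1, text2, length_of_match=10):
--     # Check if either of the texts is too short
--     if len(text1) < length_of_match or len(text2) < length_of_match:
--         return -1
--
--     # The end portion of the first text that we want to compare
--     target = text1[-length_of_match:]
--     m = len(target)
--     if m == 0:
--         # empty pattern: matches trivially at the very end of text2
--         return len(text2)
--
--     # Rabin-Karp: one forward pass with a rolling hash; remember the LAST
--     # position whose window hashes like the target and verifies exactly.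
--     MOD = 1000000007
--     BASE = 257
--     target_hash = 0
--     for ch in target:
--         target_hash = (target_hash * BASE + ord(ch)) % MOD
--     lead_pow = pow(BASE, m - 1, MOD)
--
--     h = 0
--     for ch in text2[:m]:
--         h = (h * BASE + ord(ch)) % MOD
--
--     best = -1
--     for i in range(len(text2) - m + 1):
--         if h == target_hash and text2[i:i + m] == target:
--             best = i
--         if i + m < len(text2):
--             h = ((h - ord(text2[i]) * lead_pow) * BASE + ord(text2[i + m])) % MOD
--     return best + m if best != -1 else -1
-- ===== Notes on version B (the rewrite author's own statement) =====
-- stated objective: faster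
-- what changed: Replaces A's backward scan that slices out and compares a fresh length-L window of text2 at every position with a Rabin-Karp search: one forward pass maintaining a rolling polynomial hash, comparing the window only on a hash hit and remembering the last verified match; A returns at the first match from the right, B finishes a left-to-right pass keeping the rightmost.
-- outside the precondition, e.g. on _find_tail_match_in_text('a', 'xa', 0): A returns -1, B returns 2; on _find_tail_match_in_text('ab', 'xyzb', -1): A returns -1, B returns 4
import Mathlib
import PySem

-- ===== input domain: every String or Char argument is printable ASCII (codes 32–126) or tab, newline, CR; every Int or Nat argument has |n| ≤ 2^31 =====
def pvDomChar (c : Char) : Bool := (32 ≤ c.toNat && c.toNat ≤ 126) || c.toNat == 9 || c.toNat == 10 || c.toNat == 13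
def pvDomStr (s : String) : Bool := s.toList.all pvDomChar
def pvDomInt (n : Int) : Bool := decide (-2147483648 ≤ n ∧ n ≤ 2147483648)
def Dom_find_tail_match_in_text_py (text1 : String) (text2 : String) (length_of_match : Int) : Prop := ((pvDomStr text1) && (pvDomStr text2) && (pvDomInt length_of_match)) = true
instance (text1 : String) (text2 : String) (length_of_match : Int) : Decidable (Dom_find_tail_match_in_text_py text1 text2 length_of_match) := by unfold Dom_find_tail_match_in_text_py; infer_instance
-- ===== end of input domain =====

-- B replaces A's backward slice-and-compare scan with a Rabin-Karp search (one forward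
-- pass with a rolling hash, verifying on hash hits, keeping the last verified match).

-- ===== PORT A =====
-- A's `for i in range(len(text2) - length_of_match + 1)` loop with its early `return`:
-- i counts up towards the (lazy, Python-range-like) exclusive bound.
-- fuel = number of remaining loop iterations (a totality device only)
def pvALoop (l2 target : List Char) (L : Int) : Nat → Int → Int
  | 0, _ => -1
  | fuel + 1, i =>
    let cur := PySem.List.slice l2 (some (PySem.List.len l2 - i - L)) (some (PySem.List.len l2 - i))
    if cur = target then PySem.List.len l2 - i else pvALoop l2 target L fuel (i + 1)

def find_tail_match_in_text_py (text1 : String) (text2 : String) (length_of_match : Int) : Int :=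
  let l1 := text1.toList
  let l2 := text2.toList
  if PySem.List.len l1 < length_of_match ∨ PySem.List.len l2 < length_of_match then -1
  else
    let target := PySem.List.slice l1 (some (-length_of_match)) none
    pvALoop l2 target length_of_match (PySem.List.len l2 - length_of_match + 1).toNat 0

-- ===== PORT B =====
def pvOrd (c : Char) : Int := (c.toNat : Int)

-- running `h = (h * BASE + ord(ch)) % MOD` over a string
def pvHash (s : List Char) : Int :=
  s.foldl (fun a c => PySem.Int.mod (a * 257 + pvOrd c) 1000000007) 0

-- Source B's `for i in range(len(text2) - m + 1)` loop: verify-on-hash-hit, then roll the hash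
-- fuel = number of remaining loop iterations (a totality device only)
def pvRKLoop (l2 target : List Char) (m : Nat) (th pw : Int) : Nat → Int → Int → Int → Int
  | 0, _, _, best => best
  | fuel + 1, i, h, best =>
    let best' := if h = th ∧ PySem.List.slice l2 (some i) (some (i + (m : Int))) = target
                 then i else best
    let h' := if i + (m : Int) < PySem.List.len l2 then
        PySem.Int.mod ((h - pvOrd (PySem.List.pyGetD l2 i ' ') * pw) * 257
            + pvOrd (PySem.List.pyGetD l2 (i + (m : Int)) ' ')) 1000000007
      else h
    pvRKLoop l2 target m th pw fuel (i + 1) h' best'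

def find_tail_match_in_text_py_alt (text1 : String) (text2 : String) (length_of_match : Int) : Int :=
  let l1 := text1.toList
  let l2 := text2.toList
  if PySem.List.len l1 < length_of_match ∨ PySem.List.len l2 < length_of_match then -1
  else
    let target := PySem.List.slice l1 (some (-length_of_match)) none
    let m := target.length
    if m = 0 then PySem.List.len l2
    else
      let th := pvHash target
      let pw := PySem.Int.powMod 257 (m - 1) 1000000007
      let h0 := pvHash (PySem.List.slice l2 none (some (m : Int)))
      let best := pvRKLoop l2 target m th pw (PySem.List.len l2 - (m : Int) + 1).toNat 0 h0 (-1)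
      if best ≠ -1 then best + (m : Int) else -1

-- ===== PRECONDITION & SPEC =====
-- Pre_ restricts to the natural domain length_of_match ≥ 1: for length_of_match ≤ 0
-- Python's slice arithmetic (text1[-0:] is the WHOLE of text1, and for negative values
-- the window slices degenerate) makes A's value an accident of its index arithmetic.
def Pre_find_tail_match_in_text_py (text1 : String) (text2 : String) (length_of_match : Int) : Prop :=
  1 ≤ length_of_match
instance (text1 : String) (text2 : String) (length_of_match : Int) : Decidable (Pre_find_tail_match_in_text_py text1 text2 length_of_match) := by unfold Pre_find_tail_match_in_text_py; infer_instance

def pvWitness_find_tail_match_in_text_py : String × String × Int := ("abcab", "zzab", 2)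

def Spec_find_tail_match_in_text_py (text1 : String) (text2 : String) (length_of_match : Int) (out : Int) : Prop := out = find_tail_match_in_text_py_alt text1 text2 length_of_match
instance (text1 : String) (text2 : String) (length_of_match : Int) (out : Int) : Decidable (Spec_find_tail_match_in_text_py text1 text2 length_of_match out) := by unfold Spec_find_tail_match_in_text_py; infer_instance

-- ===== CLAIM (what is proved, stated in full; the proofs are below) =====
def Claim_equal_find_tail_match_in_text_py : Prop := ∀ (text1 : String) (text2 : String) (length_of_match : Int), Dom_find_tail_match_in_text_py text1 text2 length_of_match → Pre_find_tail_match_in_text_py text1 text2 length_of_match → Spec_find_tail_match_in_text_py text1 text2 length_of_match (find_tail_match_in_text_py text1 text2 length_of_match)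

-- ===== LEMMAS AND PROOFS =====

-- proof-side helper: the rightmost j ≤ fuel with target a prefix of l2.drop j, else -1
def pvGo (l2 target : List Char) : Nat → Int
  | 0 => if target.isPrefixOf l2 then 0 else -1
  | j + 1 => if target.isPrefixOf (l2.drop (j + 1)) then ((j + 1 : Nat) : Int) else pvGo l2 target j

-- proof-side helper: Source B's scan with the hash filter erased (last match in [i, bound))
def pvLM (l2 target : List Char) (bound i best : Int) : Int :=
  if hc : i < bound then
    pvLM l2 target bound (i + 1) (if target.isPrefixOf (l2.drop i.toNat) then i else best)
  else best
termination_by (bound - i).toNat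
decreasing_by omega

-- proof-side helper: the window polynomial without the modulus
def pvPoly (s : List Char) : Int := s.foldl (fun a c => a * 257 + pvOrd c) 0

lemma pvHash_snoc (s : List Char) (c : Char) :
    pvHash (s ++ [c]) = PySem.Int.mod (pvHash s * 257 + pvOrd c) 1000000007 := by
  simp [pvHash, List.foldl_append]

lemma pvPoly_snoc (s : List Char) (c : Char) :
    pvPoly (s ++ [c]) = pvPoly s * 257 + pvOrd c := by
  simp [pvPoly, List.foldl_append]

lemma pvHash_bounds (s : List Char) : 0 ≤ pvHash s ∧ pvHash s < 1000000007 := by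
  induction s using List.reverseRecOn with
  | nil => norm_num [pvHash]
  | append_singleton s c ih =>
      rw [pvHash_snoc]
      exact ⟨PySem.Int.mod_nonneg _ (by norm_num), PySem.Int.mod_lt _ (by norm_num)⟩

lemma pvPoly_shift (s : List Char) : ∀ a : Int,
    s.foldl (fun a c => a * 257 + pvOrd c) a = a * 257 ^ s.length + pvPoly s := by
  induction s with
  | nil => intro a; simp [pvPoly]
  | cons c s ih =>
      intro a
      simp only [List.foldl_cons, List.length_cons]
      rw [ih (a * 257 + pvOrd c)]
      have h0 : pvPoly (c :: s) = (0 * 257 + pvOrd c) * 257 ^ s.length + pvPoly s := by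
        simpa [pvPoly, List.foldl_cons] using ih (0 * 257 + pvOrd c)
      rw [h0]; ring

lemma pvPoly_cons (c : Char) (s : List Char) :
    pvPoly (c :: s) = pvOrd c * 257 ^ s.length + pvPoly s := by
  have := pvPoly_shift s (pvOrd c)
  simpa [pvPoly, List.foldl_cons] using this

lemma pvHash_modeq (s : List Char) : pvHash s ≡ pvPoly s [ZMOD 1000000007] := by
  induction s using List.reverseRecOn with
  | nil => simp [pvHash, pvPoly]
  | append_singleton s c ih =>
      rw [pvHash_snoc, pvPoly_snoc, PySem.Int.mod_eq_emod_of_pos (by norm_num)]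
      calc (pvHash s * 257 + pvOrd c) % 1000000007
          ≡ pvHash s * 257 + pvOrd c [ZMOD 1000000007] := Int.emod_emod_of_dvd _ dvd_rfl
        _ ≡ pvPoly s * 257 + pvOrd c [ZMOD 1000000007] := (ih.mul_right 257).add_right _

lemma pv_eq_of_modeq {a b : Int} (h : a ≡ b [ZMOD 1000000007])
    (ha0 : 0 ≤ a) (ha1 : a < 1000000007) (hb0 : 0 ≤ b) (hb1 : b < 1000000007) : a = b := by
  have h' : a % 1000000007 = b % 1000000007 := h
  rwa [Int.emod_eq_of_lt ha0 ha1, Int.emod_eq_of_lt hb0 hb1] at h'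

-- the rolling-hash update really produces the next window's hash
lemma pv_roll (l2 : List Char) (m i : Nat) (hm : 1 ≤ m) (hi : i + m < l2.length) :
    PySem.Int.mod ((pvHash ((l2.drop i).take m)
        - pvOrd (l2.getD i ' ') * PySem.Int.powMod 257 (m - 1) 1000000007) * 257
        + pvOrd (l2.getD (i + m) ' ')) 1000000007
      = pvHash ((l2.drop (i + 1)).take m) := by
  obtain ⟨k, rfl⟩ : ∃ k, m = k + 1 := ⟨m - 1, by omega⟩
  have hiL : i < l2.length := by omega
  have himL : i + (k + 1) < l2.length := hi
  have hgd0 : l2.getD i ' ' = l2[i] := List.getD_eq_getElem l2 ' ' hiL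
  have hgd1 : l2.getD (i + (k + 1)) ' ' = l2[i + (k + 1)] := List.getD_eq_getElem l2 ' ' himL
  have hdrop : l2.drop i = l2[i] :: l2.drop (i + 1) := List.drop_eq_getElem_cons hiL
  have hw : (l2.drop i).take (k + 1) = l2[i] :: (l2.drop (i + 1)).take k := by
    rw [hdrop, List.take_succ_cons]
  have hget : (l2.drop (i + 1))[k]? = some l2[i + (k + 1)] := by
    rw [List.getElem?_drop]
    have : i + 1 + k = i + (k + 1) := by omega
    rw [this, List.getElem?_eq_getElem himL]
  have hw' : (l2.drop (i + 1)).take (k + 1) = (l2.drop (i + 1)).take k ++ [l2[i + (k + 1)]] := by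
    rw [List.take_succ, hget]; rfl
  have hmidlen : ((l2.drop (i + 1)).take k).length = k := by
    simp [List.length_take, List.length_drop]; omega
  have hb := pvHash_bounds ((l2.drop (i + 1)).take (k + 1))
  refine pv_eq_of_modeq ?_ (PySem.Int.mod_nonneg _ (by norm_num))
      (PySem.Int.mod_lt _ (by norm_num)) hb.1 hb.2
  rw [PySem.Int.mod_eq_emod_of_pos (by norm_num)]
  have hpw : PySem.Int.powMod 257 (k + 1 - 1) 1000000007 ≡ 257 ^ k [ZMOD 1000000007] := by
    rw [PySem.Int.powMod_eq_emod 257 (k + 1 - 1) (by norm_num)]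
    exact Int.emod_emod_of_dvd ((257:Int) ^ k) dvd_rfl
  have h1 : pvHash ((l2.drop i).take (k + 1)) ≡ pvPoly ((l2.drop i).take (k + 1)) [ZMOD 1000000007] :=
    pvHash_modeq _
  calc ((pvHash ((l2.drop i).take (k + 1))
        - pvOrd (l2.getD i ' ') * PySem.Int.powMod 257 (k + 1 - 1) 1000000007) * 257
        + pvOrd (l2.getD (i + (k + 1)) ' ')) % 1000000007
      ≡ (pvHash ((l2.drop i).take (k + 1))
        - pvOrd (l2.getD i ' ') * PySem.Int.powMod 257 (k + 1 - 1) 1000000007) * 257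
        + pvOrd (l2.getD (i + (k + 1)) ' ') [ZMOD 1000000007] := Int.emod_emod_of_dvd _ dvd_rfl
    _ ≡ (pvPoly ((l2.drop i).take (k + 1)) - pvOrd (l2.getD i ' ') * 257 ^ k) * 257
        + pvOrd (l2.getD (i + (k + 1)) ' ') [ZMOD 1000000007] :=
          (((h1.sub ((Int.ModEq.refl (pvOrd (l2.getD i ' '))).mul hpw)).mul_right 257).add_right _)
    _ = pvPoly ((l2.drop (i + 1)).take (k + 1)) := by
          rw [hw', pvPoly_snoc, hw, pvPoly_cons, hmidlen, hgd0, hgd1]; ring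
    _ ≡ pvHash ((l2.drop (i + 1)).take (k + 1)) [ZMOD 1000000007] := (pvHash_modeq _).symm

-- facts about pvGo: it is the rightmost match position ≤ fuel (or -1)
lemma pvGo_le (l2 target : List Char) (j : Nat) : pvGo l2 target j ≤ (j : Int) := by
  induction j with
  | zero => simp [pvGo]; split_ifs <;> simp
  | succ j ih =>
      simp only [pvGo]
      split_ifs with h
      · simp
      · push_cast; omega

lemma pvGo_match (l2 target : List Char) (j : Nat) :
    pvGo l2 target j = -1 ∨ (0 ≤ pvGo l2 target j ∧
      target.isPrefixOf (l2.drop (pvGo l2 target j).toNat) = true) := by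
  induction j with
  | zero =>
      simp only [pvGo]
      split_ifs with h
      · right; simpa using h
      · left; rfl
  | succ j ih =>
      simp only [pvGo]
      split_ifs with h
      · right
        refine ⟨by positivity, ?_⟩
        simpa using h
      · exact ih

lemma pvGo_ge (l2 target : List Char) (j j' : Nat) (hj : j' ≤ j)
    (h : target.isPrefixOf (l2.drop j') = true) : (j' : Int) ≤ pvGo l2 target j := by
  induction j with
  | zero =>
      have : j' = 0 := by omega
      subst this
      simp only [pvGo, List.drop_zero] at h ⊢
      rw [h]; simp
  | succ j ih =>
      simp only [pvGo]
      split_ifs with hp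
      · push_cast; omega
      · have hne : j' ≠ j + 1 := by
          intro hcon; subst hcon; rw [h] at hp; exact hp rfl
        exact ih (by omega)

-- the forward last-match loop computes pvGo (bound - 1) when started anywhere below it
lemma pv_lm_spec (l2 target : List Char) (n m : Nat) (hm : 1 ≤ m) (hmn : m ≤ n)
    (hn : n = l2.length) :
    ∀ (k : Nat) (best : Int), (k : Int) ≤ (n : Int) - m + 1 →
      pvLM l2 target ((n : Int) - m + 1) ((n : Int) - m + 1 - k) best
        = (if (n : Int) - m + 1 - k ≤ pvGo l2 target (n - m) then pvGo l2 target (n - m) else best) := by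
  intro k
  induction k with
  | zero =>
      intro best _
      rw [pvLM, dif_neg (by omega)]
      have := pvGo_le l2 target (n - m)
      rw [if_neg (by push_cast at this ⊢; omega)]
  | succ k ih =>
      intro best hk
      have hcast : (((k + 1 : Nat)) : Int) = (k : Int) + 1 := by push_cast; ring
      rw [hcast] at hk ⊢
      have hk' : (k : Int) ≤ (n : Int) - m + 1 := by omega
      rw [pvLM, dif_pos (by omega)]
      rw [show (n : Int) - ↑m + 1 - ((k : Int) + 1) + 1 = (n : Int) - ↑m + 1 - (k : Int) by ring]
      rw [ih _ hk']
      set i : Int := (n : Int) - ↑m + 1 - ((k : Int) + 1) with hidef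
      have hi0 : 0 ≤ i := by omega
      have hle : pvGo l2 target (n - m) ≤ (n : Int) - m := by
        have := pvGo_le l2 target (n - m)
        push_cast at this ⊢
        omega
      by_cases hcase : (n : Int) - ↑m + 1 - (k : Int) ≤ pvGo l2 target (n - m)
      · rw [if_pos hcase, if_pos (by omega)]
      · rw [if_neg hcase]
        by_cases hmatch : target.isPrefixOf (l2.drop i.toNat) = true
        · have h1 : i.toNat ≤ n - m := by omega
          have hge := pvGo_ge l2 target (n - m) i.toNat h1 hmatch
          have heq : pvGo l2 target (n - m) = i := by omega
          rw [if_pos hmatch, if_pos (by omega)]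
          omega
        · have hne : pvGo l2 target (n - m) ≠ i := by
            intro hcon
            rcases pvGo_match l2 target (n - m) with hg | ⟨hg0, hgp⟩
            · omega
            · rw [hcon] at hgp
              simp [hgp] at hmatch
          rw [if_neg hmatch, if_neg (by omega)]

-- the Rabin-Karp loop equals the plain forward last-match loop under the hash invariant
lemma pv_rk_eq_lm (l2 target : List Char) (n m : Nat) (hm : 1 ≤ m) (hmn : m ≤ n)
    (hn : n = l2.length) (htl : target.length = m) :
    ∀ (k : Nat) (i h best : Int), 0 ≤ i → i + k = (n : Int) - m + 1 →
      (i < (n : Int) - m + 1 → h = pvHash ((l2.drop i.toNat).take m)) →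
      pvRKLoop l2 target m (pvHash target) (PySem.Int.powMod 257 (m - 1) 1000000007)
          k i h best
        = pvLM l2 target ((n : Int) - m + 1) i best := by
  intro k
  induction k with
  | zero =>
      intro i h best hi0 hik _
      rw [pvLM, dif_neg (by push_cast at hik; omega)]
      rfl
  | succ k ih =>
      intro i h best hi0 hik hinv
      have hilt : i < (n : Int) - m + 1 := by push_cast at hik; omega
      have hwin : h = pvHash ((l2.drop i.toNat).take m) := hinv hilt
      have hiN : (i.toNat : Int) = i := by omega
      have himn : i.toNat + m ≤ n := by omega
      simp only [pvRKLoop]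
      rw [pvLM, dif_pos hilt]
      have hslice : PySem.List.slice l2 (some i) (some (i + (m : Int)))
          = (l2.drop i.toNat).take m := by
        rw [← hiN]
        have : (i.toNat : Int) + (m : Int) = ((i.toNat + m : Nat) : Int) := by push_cast; ring
        rw [this, PySem.List.slice_natCast]
        congr 1
        omega
      have hcond : (h = pvHash target ∧
          PySem.List.slice l2 (some i) (some (i + (m : Int))) = target)
          ↔ target.isPrefixOf (l2.drop i.toNat) = true := by
        rw [hslice]
        constructor
        · rintro ⟨_, hEq⟩
          rw [List.isPrefixOf_iff_prefix]
          rw [List.prefix_iff_eq_take, htl]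
          exact hEq.symm
        · intro hpre
          rw [List.isPrefixOf_iff_prefix] at hpre
          have hEq : (l2.drop i.toNat).take m = target := by
            rw [← htl]
            exact (List.prefix_iff_eq_take.mp hpre).symm
          exact ⟨by rw [hwin, hEq], hEq⟩
      have hbest : (if h = pvHash target ∧
            PySem.List.slice l2 (some i) (some (i + (m : Int))) = target then i else best)
          = (if target.isPrefixOf (l2.drop i.toNat) = true then i else best) := by
        by_cases hp : target.isPrefixOf (l2.drop i.toNat) = true
        · rw [if_pos (hcond.mpr hp), if_pos hp]
        · rw [if_neg (fun hc => hp (hcond.mp hc)), if_neg hp]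
      rw [hbest]
      refine ih (i + 1) _ _ (by omega) (by push_cast at hik ⊢; omega) ?_
      intro hlt'
      have hroll : i + (m : Int) < PySem.List.len l2 := by
        rw [PySem.List.len_eq, ← hn]
        push_cast at hlt' ⊢
        omega
      rw [if_pos hroll]
      have hgd0 : PySem.List.pyGetD l2 i ' ' = l2.getD i.toNat ' ' := by
        conv_lhs => rw [← hiN]
        rw [PySem.List.pyGetD_natCast]
      have hgd1 : PySem.List.pyGetD l2 (i + (m : Int)) ' ' = l2.getD (i.toNat + m) ' ' := by
        have : i + (m : Int) = ((i.toNat + m : Nat) : Int) := by push_cast; omega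
        rw [this, PySem.List.pyGetD_natCast]
      have hlen : i.toNat + m < l2.length := by rw [← hn]; omega
      have hsucc : (i + 1).toNat = i.toNat + 1 := by omega
      rw [hgd0, hgd1, hwin, hsucc]
      exact pv_roll l2 m i.toNat hm hlen

-- A's ascending scan from start n2-L-j to the bound equals pvGo's descending scan from j.
lemma pv_loop_eq_go (l2 target : List Char) (L : Int) (L' : Nat) (hL : L = (L' : Int))
    (hL' : 1 ≤ L') (htl : target.length = L') :
    ∀ (j : Nat), j ≤ l2.length - L' →
      pvALoop l2 target L (j + 1) ((l2.length : Int) - L - j)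
        = (if pvGo l2 target j = -1 then -1 else pvGo l2 target j + L) := by
  intro j
  induction j with
  | zero =>
      intro _
      show pvALoop l2 target L (0 + 1) _ = _
      simp only [pvALoop]
      simp only [Nat.cast_zero, sub_zero, PySem.List.len_eq]
      have e1 : (l2.length : Int) - ((l2.length : Int) - L) - L = ((0 : Nat) : Int) := by
        push_cast; ring
      have e2 : (l2.length : Int) - ((l2.length : Int) - L) = ((L' : Nat) : Int) := by
        omega
      rw [e1, e2, PySem.List.slice_natCast]
      simp only [pvGo, Nat.sub_zero, List.drop_zero]
      by_cases h : target <+: l2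
      · have hcur : l2.take L' = target := by
          rw [← htl]; exact (List.prefix_iff_eq_take.mp h).symm
        have hb : target.isPrefixOf l2 = true := (List.isPrefixOf_iff_prefix).mpr h
        rw [if_pos (by simpa using hcur), hb, if_pos rfl, if_neg (by omega)]
        omega
      · have hcur : ¬ l2.take L' = target := by
          intro hc
          exact h (List.prefix_iff_eq_take.mpr (by rw [htl]; exact hc.symm))
        have hb : target.isPrefixOf l2 = false := by
          cases hbb : target.isPrefixOf l2
          · rfl
          · exact (h ((List.isPrefixOf_iff_prefix).mp hbb)).elim
        rw [if_neg (by simpa using hcur), hb]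
        simp
  | succ j ih =>
      intro hj
      push_cast
      show pvALoop l2 target L (j + 1 + 1) _ = _
      simp only [pvALoop]
      simp only [PySem.List.len_eq]
      have e1 : (l2.length : Int) - ((l2.length : Int) - L - ((j : Int) + 1)) - L
          = ((j + 1 : Nat) : Int) := by push_cast; ring
      have e2 : (l2.length : Int) - ((l2.length : Int) - L - ((j : Int) + 1))
          = ((j + 1 + L' : Nat) : Int) := by push_cast; omega
      rw [e1, e2, PySem.List.slice_natCast]
      simp only [pvGo]
      have e3 : j + 1 + L' - (j + 1) = L' := by omega
      have e4 : (l2.length : Int) - L - ((j : Int) + 1) + 1 = (l2.length : Int) - L - j := by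
        ring
      rw [e3, e4]
      by_cases h : target <+: l2.drop (j + 1)
      · have hcur : (l2.drop (j + 1)).take L' = target := by
          rw [← htl]; exact (List.prefix_iff_eq_take.mp h).symm
        have hb : target.isPrefixOf (l2.drop (j + 1)) = true :=
          (List.isPrefixOf_iff_prefix).mpr h
        rw [if_pos hcur, hb, if_pos rfl, if_neg (by push_cast; omega)]
        push_cast; omega
      · have hcur : ¬ (l2.drop (j + 1)).take L' = target := by
          intro hc
          exact h (List.prefix_iff_eq_take.mpr (by rw [htl]; exact hc.symm))
        have hb : target.isPrefixOf (l2.drop (j + 1)) = false := by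
          cases hbb : target.isPrefixOf (l2.drop (j + 1))
          · rfl
          · exact (h ((List.isPrefixOf_iff_prefix).mp hbb)).elim
        rw [if_neg hcur, hb]
        simp only [Bool.false_eq_true, if_false]
        exact ih (by omega)

-- the tail slice text1[-L:] for 1 ≤ L ≤ len(text1)
lemma pv_target_spec (l1 : List Char) (L : Int) (L' : Nat) (hL : L = (L' : Int))
    (hL' : 1 ≤ L') (hL1 : L' ≤ l1.length) :
    PySem.List.slice l1 (some (-L)) none = l1.drop (l1.length - L') ∧
    (PySem.List.slice l1 (some (-L)) none).length = L' := by
  have h1 : PySem.List.slice l1 (some (-L)) none = l1.drop (l1.length - L') := by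
    rw [hL, PySem.List.slice_from_neg_natCast _ _ (by omega)]
  refine ⟨h1, ?_⟩
  rw [h1, List.length_drop]
  omega

-- ===== VERDICT (by name: the statement is the Claim_ definition above) =====
theorem find_tail_match_in_text_py_spec : Claim_equal_find_tail_match_in_text_py := by
  intro text1 text2 L _ hpre
  unfold Spec_find_tail_match_in_text_py
  unfold find_tail_match_in_text_py find_tail_match_in_text_py_alt
  simp only [PySem.List.len_eq]
  by_cases hshort : ((text1.toList.length : Int) < L ∨ (text2.toList.length : Int) < L)
  · rw [if_pos hshort, if_pos hshort]
  · rw [if_neg hshort, if_neg hshort]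
    rw [not_or, not_lt, not_lt] at hshort
    obtain ⟨hL1, hL2⟩ := hshort
    have hpre' : (1 : Int) ≤ L := hpre
    set l1 := text1.toList
    set l2 := text2.toList
    set L' : Nat := L.toNat with hL'def
    have hL : L = (L' : Int) := by omega
    have hL'1 : 1 ≤ L' := by omega
    have hL'l1 : L' ≤ l1.length := by omega
    have hL'l2 : L' ≤ l2.length := by omega
    obtain ⟨htgt, htl⟩ := pv_target_spec l1 L L' hL hL'1 hL'l1
    set target := PySem.List.slice l1 (some (-L)) none with htdef
    set rf := pvGo l2 target (l2.length - L') with hrfdef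
    -- A's side
    have hA := pv_loop_eq_go l2 target L L' hL hL'1 htl (l2.length - L') (le_refl _)
    rw [show (l2.length : Int) - L - ((l2.length - L' : Nat) : Int) = 0 by omega] at hA
    rw [show ((l2.length : Int) - L + 1).toNat = (l2.length - L') + 1 by omega, hA]
    -- B's side
    rw [if_neg (by omega : ¬ target.length = 0)]
    have hh0 : PySem.List.slice l2 none (some ((target.length : Nat) : Int))
        = (l2.drop (0 : Int).toNat).take target.length := by
      rw [PySem.List.slice_to_natCast]
      simp
    have hlen2 : target.length ≤ l2.length := htl ▸ hL'l2
    have htgt1 : 1 ≤ target.length := by omega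
    have hB := pv_rk_eq_lm l2 target l2.length target.length htgt1 hlen2 rfl rfl
      (((l2.length : Int) - target.length + 1).toNat) 0
      (pvHash (PySem.List.slice l2 none (some ((target.length : Nat) : Int)))) (-1)
      (le_refl 0) (by omega) (fun _ => by rw [hh0])
    rw [hB]
    have hLM := pv_lm_spec l2 target l2.length target.length htgt1 hlen2 rfl
      (((l2.length : Int) - target.length + 1).toNat) (-1) (by omega)
    rw [show ((l2.length : Int) - target.length + 1
          - (((l2.length : Int) - target.length + 1).toNat : Int)) = 0 by omega] at hLM
    rw [hLM]
    rw [show l2.length - target.length = l2.length - L' by rw [htl]]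
    rcases pvGo_match l2 target (l2.length - L') with hneg | ⟨h0, _⟩
    · rw [← hrfdef] at hneg ⊢
      rw [hneg]
      norm_num
    · rw [← hrfdef] at h0 ⊢
      rw [if_pos h0, if_neg (show ¬ rf = -1 by omega), if_pos (show rf ≠ -1 by omega)]
      omega
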